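-- pv_equiv track=rewrite | github.com/kurta17/problem-solving | cses/mathematics/1.py | find
-- ===== SOURCE A (Python) =====
-- def find(n, k):
--     while n > 1:
--         if k % 2 == 0:
--             k = k // 2
--         else:
--             k = k // 2 + 1
--         n //= 2
--     return k
-- ===== SOURCE B (Python) =====
-- def find(n, k):
--     # Each loop step of A replaces k by ceil(k/2) and halves n; the loop runs
--     # bit_length(n)-1 times for n > 1, so return ceil(k / 2**m) in closed form.
--     m = n.bit_length() - 1 if n > 1 else 0
--     d = 1 << m
--     return (k + d - 1) // d
-- ===== Notes on version B (the rewrite author's own statement) =====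
-- stated objective: faster
-- what changed: Replaces the halving loop by a closed form: the loop applies k := ceil(k/2) exactly bit_length(n)-1 times, so B computes m once and returns ceil(k/2^m) directly.
import Mathlib
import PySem

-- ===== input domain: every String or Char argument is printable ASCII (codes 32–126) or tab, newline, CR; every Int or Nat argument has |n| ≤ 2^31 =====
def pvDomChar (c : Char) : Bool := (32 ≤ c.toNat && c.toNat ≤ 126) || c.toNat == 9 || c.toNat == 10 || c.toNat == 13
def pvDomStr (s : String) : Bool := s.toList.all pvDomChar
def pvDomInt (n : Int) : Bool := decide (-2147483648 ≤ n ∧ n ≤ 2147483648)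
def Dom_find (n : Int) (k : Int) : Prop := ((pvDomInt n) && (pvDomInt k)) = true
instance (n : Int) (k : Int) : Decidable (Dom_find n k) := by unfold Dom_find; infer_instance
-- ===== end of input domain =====

-- B replaces A's halving loop by the closed form ceil(k / 2^m), m = bit_length(n) - 1 (objective: faster, constant-time arithmetic).

-- ===== PORT A =====
def find (n : Int) (k : Int) : Int :=
  if h : n > 1 then
    find (PySem.Int.floordiv n 2)
      (if PySem.Int.mod k 2 == 0 then PySem.Int.floordiv k 2 else PySem.Int.floordiv k 2 + 1)
  else k
termination_by n.toNat
decreasing_by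
  have h2 : PySem.Int.floordiv n 2 = n / 2 := PySem.Int.floordiv_eq_ediv_of_pos (by omega)
  rw [h2]; omega

-- ===== PORT B =====
def find_alt (n : Int) (k : Int) : Int :=
  let m : Nat := if n > 1 then PySem.Int.bitLength n - 1 else 0
  let d : Int := 2 ^ m
  PySem.Int.floordiv (k + d - 1) d

-- ===== PRECONDITION & SPEC =====
def Spec_find (n : Int) (k : Int) (out : Int) : Prop := out = find_alt n k
instance (n : Int) (k : Int) (out : Int) : Decidable (Spec_find n k out) := by unfold Spec_find; infer_instance

-- ===== CLAIM (what is proved, stated in full; the proofs are below) =====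
def Claim_equal_find : Prop := ∀ (n : Int) (k : Int), Dom_find n k → Spec_find n k (find n k)

-- ===== LEMMAS AND PROOFS =====

-- ceiling-division characterisation: floordiv (a + d - 1) d = q ↔ (q-1)*d < a ∧ a ≤ q*d  (0 < d)
theorem ceil_char (a d q : Int) (hd : 0 < d) :
    PySem.Int.floordiv (a + d - 1) d = q ↔ (q - 1) * d < a ∧ a ≤ q * d := by
  rw [PySem.Int.floordiv_eq_iff_of_pos hd]
  constructor <;> rintro ⟨h1, h2⟩ <;> constructor <;> nlinarith

-- composing two ceiling halvings: ceil(ceil(a/2)/d) = ceil(a/(2d))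
theorem ceil_compose (a d : Int) (hd : 0 < d) :
    PySem.Int.floordiv (PySem.Int.floordiv (a + 1) 2 + d - 1) d
      = PySem.Int.floordiv (a + 2 * d - 1) (2 * d) := by
  set q := PySem.Int.floordiv (a + 2 * d - 1) (2 * d) with hq
  have hq' : (q - 1) * (2 * d) < a ∧ a ≤ q * (2 * d) := by
    have := (ceil_char a (2 * d) q (by omega)).mp
    simpa [mul_comm, mul_left_comm, mul_assoc] using this (by rw [hq])
  have hc : PySem.Int.floordiv (a + 1) 2 = PySem.Int.floordiv (a + 2 - 1) 2 := by ring_nf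
  rw [hc]
  set c := PySem.Int.floordiv (a + 2 - 1) 2 with hcdef
  have hcc : (c - 1) * 2 < a ∧ a ≤ c * 2 := (ceil_char a 2 c (by omega)).mp rfl
  rw [ceil_char c d q hd]
  constructor <;> nlinarith [hq'.1, hq'.2, hcc.1, hcc.2]

-- A's branch computes ceil(k/2) = floordiv (k+1) 2
theorem branch_eq (k : Int) :
    (if PySem.Int.mod k 2 == 0 then PySem.Int.floordiv k 2 else PySem.Int.floordiv k 2 + 1)
      = PySem.Int.floordiv (k + 1) 2 := by
  have h1 : PySem.Int.floordiv k 2 = k / 2 := PySem.Int.floordiv_eq_ediv_of_pos (by omega)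
  have h2 : PySem.Int.floordiv (k + 1) 2 = (k + 1) / 2 := PySem.Int.floordiv_eq_ediv_of_pos (by omega)
  have h3 : PySem.Int.mod k 2 = k % 2 := PySem.Int.mod_eq_emod_of_pos (by omega)
  rw [h1, h2, h3]
  by_cases h : k % 2 = 0 <;> simp [h] <;> omega

-- the number of halvings: for n > 1, bitLength n - 1 = (bitLength (n//2) - 1) + 1 when n//2 > 1, else 1
theorem find_eq_ceil : ∀ (n : Int) (k : Int),
    find n k = PySem.Int.floordiv (k + 2 ^ (if n > 1 then PySem.Int.bitLength n - 1 else 0) - 1)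
                 (2 ^ (if n > 1 then PySem.Int.bitLength n - 1 else 0)) := by
  intro n k
  induction n, k using find.induct with
  | case1 n k h ih =>
    rw [find, dif_pos h]
    simp only [dite_eq_ite] at ih
    rw [ih, branch_eq]
    set n' := PySem.Int.floordiv n 2 with hn'
    have hn'v : n' = n / 2 := PySem.Int.floordiv_eq_ediv_of_pos (by omega)
    have hbl : PySem.Int.bitLength n = PySem.Int.bitLength n' + 1 :=
      PySem.Int.bitLength_of_pos (by omega)
    have hm : (if n > 1 then PySem.Int.bitLength n - 1 else 0)
        = (if n' > 1 then PySem.Int.bitLength n' - 1 else 0) + 1 := by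
      by_cases h2 : n' > 1
      · have h1 : 1 ≤ PySem.Int.bitLength n' := by
          by_contra hc
          have h0 : PySem.Int.bitLength n' = 0 := by omega
          have hlt := PySem.Int.lt_two_pow_bitLength n'
          rw [h0] at hlt
          simp at hlt
          omega
        simp [h, h2, hbl]; omega
      · have hn1 : n' = 1 := by omega
        have hb1 : PySem.Int.bitLength n' = 1 := by rw [hn1]; decide
        simp [h, h2, hbl, hb1]
    rw [hm, pow_succ]
    have hd : (0:Int) < 2 ^ (if n' > 1 then PySem.Int.bitLength n' - 1 else 0) := by positivity
    rw [mul_comm]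
    exact ceil_compose k _ hd
  | case2 n k h =>
    rw [find, dif_neg h, if_neg h]
    rw [pow_zero]
    rw [PySem.Int.floordiv_eq_ediv_of_pos (by omega : (0:Int) < 1)]
    omega

-- ===== VERDICT (by name: the statement is the Claim_ definition above) =====
theorem find_spec : Claim_equal_find := by
  intro n k _
  show find n k = find_alt n k
  rw [find_eq_ceil, find_alt]
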